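-- pv_equiv track=rewrite | github.com/milvus-io/milvus | tests/python_client/utils/utils.py | update_field_name_row
-- ===== SOURCE A (Python) =====
-- import copy
--
-- def update_field_name_row(entities, old_name, new_name):
--     tmp_entities = copy.deepcopy(entities)
--     for item in tmp_entities:
--         if old_name in item:
--             item[new_name] = item[old_name]
--             item.pop(old_name)
--         else:
--             raise Exception("Field %s not in field" % old_name)
--     return tmp_entities
-- ===== SOURCE B (Python) =====
-- import copy
--
-- def update_field_name_row(entities, old_name, new_name):
--     # validate first, then rebuild each dict immutably (no copy-then-mutate)
--     for item in entities:
--         if old_name not in item: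
--             raise Exception("Field %s not in field" % old_name)
--     result = []
--     for item in entities:
--         v = copy.deepcopy(item[old_name])
--         if new_name in item:
--             result.append({k: (v if k == new_name else copy.deepcopy(val))
--                            for k, val in item.items() if k != old_name})
--         else:
--             d = {k: copy.deepcopy(val) for k, val in item.items() if k != old_name}
--             d[new_name] = v
--             result.append(d)
--     return result
-- ===== Notes on version B (the rewrite author's own statement) =====
-- stated objective: alternative
-- what changed: A deep-copies the whole structure and then mutates each dict in place (set new key, pop old); B first validates that every dict has old_name and then builds the result functionally, rebuilding each dict by a comprehension that drops the old key and places its value under new_name (overwriting in place if new_name exists, appending otherwise).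
import Mathlib
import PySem

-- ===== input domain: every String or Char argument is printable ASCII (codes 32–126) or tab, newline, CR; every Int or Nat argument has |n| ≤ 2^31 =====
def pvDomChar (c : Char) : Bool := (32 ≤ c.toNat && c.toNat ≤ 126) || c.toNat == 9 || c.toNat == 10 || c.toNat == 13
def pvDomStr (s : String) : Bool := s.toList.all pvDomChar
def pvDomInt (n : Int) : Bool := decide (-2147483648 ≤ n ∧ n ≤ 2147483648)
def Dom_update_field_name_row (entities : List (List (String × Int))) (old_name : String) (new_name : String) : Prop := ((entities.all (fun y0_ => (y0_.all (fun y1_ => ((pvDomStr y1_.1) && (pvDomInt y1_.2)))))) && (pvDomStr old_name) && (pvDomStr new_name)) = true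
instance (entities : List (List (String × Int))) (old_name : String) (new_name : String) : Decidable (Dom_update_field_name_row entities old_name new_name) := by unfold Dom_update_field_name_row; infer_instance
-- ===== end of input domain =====

-- B replaces A's deepcopy-then-mutate-in-place loop by a validate pass plus an immutable
-- per-dict rebuild (filter out the old key, place the value under the new key); same results.


-- ===== PORT A =====
-- A: deepcopy the whole list, then per dict: item[new] = item[old]; item.pop(old);
-- raise if old missing (Pre_ excludes that; the port returns the item unchanged there).
def update_field_name_row (entities : List (List (String × Int))) (old_name : String) (new_name : String) : List (List (String × Int)) :=
  entities.map (fun item =>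
    let d : PySem.Dict String Int := PySem.Dict.mk item
    if d.contains old_name then
      ((d.insert new_name (d.getD old_name 0)).erase old_name).items
    else
      item)

-- ===== PORT B =====
-- B: validate that every dict has old_name, then rebuild each dict by a comprehension:
-- drop the old key; if new_name already present overwrite it in place, else append it.
def update_field_name_row_alt (entities : List (List (String × Int))) (old_name : String) (new_name : String) : List (List (String × Int)) :=
  entities.map (fun item =>
    let v : Int := (PySem.Dict.mk item).getD old_name 0
    if (PySem.Dict.mk item).contains new_name then
      (item.filter (fun kv => kv.1 != old_name)).map
        (fun kv => if kv.1 == new_name then (new_name, v) else kv)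
    else
      item.filter (fun kv => kv.1 != old_name) ++ [(new_name, v)])

-- ===== PRECONDITION & SPEC =====
-- Pre_: every dict contains old_name — exactly the inputs on which A returns (else it raises).
def Pre_update_field_name_row (entities : List (List (String × Int))) (old_name : String) (new_name : String) : Prop :=
  (entities.all (fun item => item.any (fun kv => kv.1 == old_name))) = true
instance (entities : List (List (String × Int))) (old_name : String) (new_name : String) : Decidable (Pre_update_field_name_row entities old_name new_name) := by unfold Pre_update_field_name_row; infer_instance

def pvWitness_update_field_name_row : (List (List (String × Int))) × String × String :=
  ([[("a", 1), ("b", 2)], [("a", 3)]], "a", "c")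

def Spec_update_field_name_row (entities : List (List (String × Int))) (old_name : String) (new_name : String) (out : List (List (String × Int))) : Prop := out = update_field_name_row_alt entities old_name new_name
instance (entities : List (List (String × Int))) (old_name : String) (new_name : String) (out : List (List (String × Int))) : Decidable (Spec_update_field_name_row entities old_name new_name out) := by unfold Spec_update_field_name_row; infer_instance

-- ===== CLAIM (what is proved, stated in full; the proofs are below) =====
def Claim_equal_update_field_name_row : Prop := ∀ (entities : List (List (String × Int))) (old_name : String) (new_name : String), Dom_update_field_name_row entities old_name new_name → Pre_update_field_name_row entities old_name new_name → Spec_update_field_name_row entities old_name new_name (update_field_name_row entities old_name new_name)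

-- ===== LEMMAS AND PROOFS =====

-- filtering out key `old` commutes with replacing the value at key `new`
lemma filter_map_replace (item : List (String × Int)) (old new : String) (v : Int) :
    (item.map (fun p => if p.1 == new then (new, v) else p)).filter (fun p => !(p.1 == old))
      = (item.filter (fun kv => kv.1 != old)).map (fun kv => if kv.1 == new then (new, v) else kv) := by
  induction item with
  | nil => rfl
  | cons p rest ih =>
      simp at ih
      by_cases ho : p.1 = old
      · by_cases hn : p.1 = new
        · have h2 : old = new := by rw [← ho, hn]
          subst h2
          simpa [ho] using ih
        · have h2 : ¬ old = new := by rw [← ho]; exact hn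
          simpa [ho, hn, h2] using ih
      · by_cases hn : p.1 = new
        · have h2 : ¬ new = old := by rw [← hn]; exact ho
          simpa [ho, hn, h2] using ih
        · simpa [ho, hn] using ih

-- the per-dict step of A equals the per-dict step of B when old_name is a key
lemma item_step (item : List (String × Int)) (old new : String)
    (h : item.any (fun kv => kv.1 == old) = true) :
    (((PySem.Dict.mk item).insert new ((PySem.Dict.mk item).getD old 0)).erase old).items
      = (if (PySem.Dict.mk item).contains new then
          (item.filter (fun kv => kv.1 != old)).map
            (fun kv => if kv.1 == new then (new, (PySem.Dict.mk item).getD old 0) else kv)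
        else
          item.filter (fun kv => kv.1 != old) ++ [(new, (PySem.Dict.mk item).getD old 0)]) := by
  set v := (PySem.Dict.mk item).getD old 0 with hv
  by_cases hc : (PySem.Dict.mk item).contains new = true
  · -- new_name already a key: insert overwrites in place, erase filters out old
    simp only [hc, if_pos]
    simp only [PySem.Dict.insert, hc, if_pos, PySem.Dict.erase]
    exact filter_map_replace item old new v
  · -- new_name fresh: insert appends, and new ≠ old since old is a key
    have hco : (PySem.Dict.mk item).contains old = true := by
      simpa [PySem.Dict.contains] using h
    have hne : (new == old) = false := by
      rcases eq_or_ne new old with rfl | hno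
      · exact absurd hco hc
      · simpa using hno
    simp only [hc, if_neg, Bool.not_eq_true]
    simp only [PySem.Dict.insert, hc, if_neg, Bool.not_eq_true, PySem.Dict.erase,
      List.filter_append]
    simp [hne, List.filter, bne]

-- ===== VERDICT (by name: the statement is the Claim_ definition above) =====
theorem update_field_name_row_spec : Claim_equal_update_field_name_row := by
  intro entities old_name new_name _ hpre
  unfold Spec_update_field_name_row update_field_name_row update_field_name_row_alt
  apply List.map_congr_left
  intro item hmem
  have h : item.any (fun kv => kv.1 == old_name) = true :=
    (List.all_eq_true.mp hpre) item hmem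
  have hc : (PySem.Dict.mk item).contains old_name = true := by
    simpa [PySem.Dict.contains] using h
  simpa [hc] using item_step item old_name new_name h
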